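-- pv_equiv track=rewrite | github.com/robertbrod/aoc | 2024/15/solution.py | parse_input_1
-- ===== SOURCE A (Python) =====
-- def parse_input_1(input):
--     warehouse_map = []
--     movements = []
--     robot_position = None
--
--     for index, line in enumerate(input):
--         if not line:
--             continue
--
--         elif line[0] == '#':
--             if '@' in line:
--                 robot_position = (line.index('@'), index)
--
--             warehouse_map.append([char for char in line])
--         else:
--             movements.extend(line)
--
--     return warehouse_map, movements, robot_position
-- ===== SOURCE B (Python) =====
-- def parse_input_1(input):
--     warehouse_map = [[char for char in line] for line in input if line and line[0] == '#']
--     movements = [char for line in input if line and line[0] != '#' for char in line]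
--     robot_position = None
--     for index in range(len(input) - 1, -1, -1):
--         line = input[index]
--         if line and line[0] == '#' and '@' in line:
--             robot_position = (line.index('@'), index)
--             break
--     return warehouse_map, movements, robot_position
-- ===== Notes on version B (the rewrite author's own statement) =====
-- stated objective: simpler
-- what changed: Replaces A's single interleaved loop carrying three accumulators by three independent passes: a filter/map comprehension for the map lines, a filter/flatten comprehension for the movements, and a backward scan with early exit that finds the last '#'-line containing '@' for the robot position.
import Mathlib
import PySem

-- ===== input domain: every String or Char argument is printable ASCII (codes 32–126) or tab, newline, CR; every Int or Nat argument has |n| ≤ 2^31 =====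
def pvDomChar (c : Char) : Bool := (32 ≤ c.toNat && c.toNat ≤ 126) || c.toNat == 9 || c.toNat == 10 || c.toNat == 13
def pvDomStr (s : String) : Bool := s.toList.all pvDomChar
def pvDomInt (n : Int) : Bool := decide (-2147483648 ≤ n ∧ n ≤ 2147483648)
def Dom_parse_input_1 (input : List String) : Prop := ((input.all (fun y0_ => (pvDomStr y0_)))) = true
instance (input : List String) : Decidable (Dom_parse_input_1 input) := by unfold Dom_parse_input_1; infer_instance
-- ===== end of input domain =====

-- B replaces A's single interleaved accumulator loop by three independent passes
-- (filter/map for the map, filter/flatten for the movements, a backward scan with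
-- early exit for the robot); objective: simpler decomposition, same cost.

-- ===== PORT A =====
-- [char for char in line] : list of 1-char strings
def pvChars (line : String) : List String := line.toList.map (fun c => String.ofList [c])

-- the for-loop of A, index carried explicitly (enumerate), state (warehouse_map, movements, robot_position)
def pvLoopA : Int → List String → List (List String) × List String × Option (Int × Int) →
    List (List String) × List String × Option (Int × Int)
  | _, [], st => st
  | index, line :: rest, (wm, mv, rp) =>
    if line = "" then pvLoopA (index + 1) rest (wm, mv, rp)
    else if line.toList.head? = some '#' then
      let rp' := if PySem.Str.isIn "@" line then some (PySem.Str.find line "@", index) else rp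
      pvLoopA (index + 1) rest (wm ++ [pvChars line], mv, rp')
    else pvLoopA (index + 1) rest (wm, mv ++ pvChars line, rp)

def parse_input_1 (input : List String) : List (List String) × List String × (Option (Int × Int)) :=
  pvLoopA 0 input ([], [], none)

-- ===== PORT B =====
-- the backward index loop of Source B, transliterated over the reversed enumeration, early exit = first match
def pvFindRobotRev : List (Int × String) → Option (Int × Int)
  | [] => none
  | (i, line) :: rest =>
    if line ≠ "" ∧ line.toList.head? = some '#' ∧ PySem.Str.isIn "@" line then
      some (PySem.Str.find line "@", i)
    else pvFindRobotRev rest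

def parse_input_1_alt (input : List String) : List (List String) × List String × (Option (Int × Int)) :=
  let warehouse_map := (input.filter (fun l => decide (l ≠ "" ∧ l.toList.head? = some '#'))).map pvChars
  let movements := (input.filter (fun l => decide (l ≠ "" ∧ l.toList.head? ≠ some '#'))).flatMap pvChars
  (warehouse_map, movements, pvFindRobotRev ((PySem.List.enumerate input 0).reverse))

-- ===== PRECONDITION & SPEC =====
def Spec_parse_input_1 (input : List String) (out : List (List String) × List String × (Option (Int × Int))) : Prop := out = parse_input_1_alt input
instance (input : List String) (out : List (List String) × List String × (Option (Int × Int))) : Decidable (Spec_parse_input_1 input out) := by unfold Spec_parse_input_1; infer_instance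

-- ===== CLAIM (what is proved, stated in full; the proofs are below) =====
def Claim_equal_parse_input_1 : Prop := ∀ (input : List String), Dom_parse_input_1 input → Spec_parse_input_1 input (parse_input_1 input)

-- ===== LEMMAS AND PROOFS =====

theorem pvFindRobotRev_append (l₁ l₂ : List (Int × String)) :
    pvFindRobotRev (l₁ ++ l₂) = (pvFindRobotRev l₁).or (pvFindRobotRev l₂) := by
  induction l₁ with
  | nil => simp [pvFindRobotRev]
  | cons p rest ih =>
    obtain ⟨i, line⟩ := p
    simp only [List.cons_append, pvFindRobotRev]
    split_ifs with h
    · rfl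
    · exact ih

theorem pvLoopA_eq (xs : List String) : ∀ (i0 : Int) (wm : List (List String)) (mv : List String)
    (rp : Option (Int × Int)),
    pvLoopA i0 xs (wm, mv, rp) =
      (wm ++ (xs.filter (fun l => decide (l ≠ "" ∧ l.toList.head? = some '#'))).map pvChars,
       mv ++ (xs.filter (fun l => decide (l ≠ "" ∧ l.toList.head? ≠ some '#'))).flatMap pvChars,
       (pvFindRobotRev ((PySem.List.enumerate xs i0).reverse)).or rp) := by
  induction xs with
  | nil => intro i0 wm mv rp; simp [pvLoopA, PySem.List.enumerate_nil, pvFindRobotRev]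
  | cons line rest ih =>
    intro i0 wm mv rp
    rw [PySem.List.enumerate_cons, List.reverse_cons, pvFindRobotRev_append, Option.or_assoc]
    by_cases h0 : line = ""
    · have h1 : pvFindRobotRev [(i0, line)] = none := by simp [pvFindRobotRev, h0]
      simp only [pvLoopA, if_pos h0, h1, Option.none_or]
      rw [ih]
      simp [h0]
    · by_cases hh : line.toList.head? = some '#'
      · by_cases h2 : PySem.Str.isIn "@" line
        · have h1 : pvFindRobotRev [(i0, line)] = some (PySem.Str.find line "@", i0) := by
            simp only [pvFindRobotRev]
            rw [if_pos (⟨h0, hh, h2⟩ :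
              line ≠ "" ∧ line.toList.head? = some '#' ∧ PySem.Str.isIn "@" line)]
          simp only [pvLoopA, if_neg h0, if_pos hh, if_pos h2, h1, Option.some_or]
          rw [ih]
          simp [h0, hh]
        · have h1 : pvFindRobotRev [(i0, line)] = none := by
            simp only [pvFindRobotRev]
            rw [if_neg (fun hc => h2 hc.2.2)]
          simp only [pvLoopA, if_neg h0, if_pos hh, if_neg h2, h1, Option.none_or]
          rw [ih]
          simp [h0, hh]
      · have h1 : pvFindRobotRev [(i0, line)] = none := by
          simp only [pvFindRobotRev]
          rw [if_neg (fun hc => hh hc.2.1)]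
        simp only [pvLoopA, if_neg h0, if_neg hh, h1, Option.none_or]
        rw [ih]
        simp [h0, hh]

-- ===== VERDICT (by name: the statement is the Claim_ definition above) =====
theorem parse_input_1_spec : Claim_equal_parse_input_1 := by
  intro input _
  unfold Spec_parse_input_1 parse_input_1 parse_input_1_alt
  rw [pvLoopA_eq]
  simp
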